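-- pv_equiv track=rewrite | github.com/benquick123/code-profiling | code/batch-2/vse-naloge-brez-testov/DN12-M-145.py | poisci_pot
-- ===== SOURCE A (Python) =====
-- def poisci_pot(zemljevid, x, y, path):
--     path = path + [x]
--     if x == y:
--         return path
--     if x not in zemljevid.keys():
--         return None
--     shortest = None
--     for krizisce in zemljevid[x]:
--         if krizisce not in path:
--             newpath = poisci_pot(zemljevid, krizisce, y, path)
--             if newpath:
--                 if not shortest or len(newpath) < len(shortest):
--                     shortest = newpath
--     return shortest
-- ===== SOURCE B (Python) =====
-- def poisci_pot(zemljevid, x, y, path):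
--     frontier = [path + [x]]
--     while frontier:
--         nxt = []
--         for p in frontier:
--             u = p[-1]
--             if u == y:
--                 return p
--             for v in zemljevid.get(u, []):
--                 if v not in p:
--                     nxt.append(p + [v])
--         frontier = nxt
--     return None
-- ===== Notes on version B (the rewrite author's own statement) =====
-- stated objective: alternative
-- what changed: Replaces A's recursive depth-first enumeration of every simple path (keeping the first strictly shorter result) by an iterative breadth-first frontier expansion that returns the first path reaching y at the lowest level, which is the same length-then-discovery-order minimum.
import Mathlib
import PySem

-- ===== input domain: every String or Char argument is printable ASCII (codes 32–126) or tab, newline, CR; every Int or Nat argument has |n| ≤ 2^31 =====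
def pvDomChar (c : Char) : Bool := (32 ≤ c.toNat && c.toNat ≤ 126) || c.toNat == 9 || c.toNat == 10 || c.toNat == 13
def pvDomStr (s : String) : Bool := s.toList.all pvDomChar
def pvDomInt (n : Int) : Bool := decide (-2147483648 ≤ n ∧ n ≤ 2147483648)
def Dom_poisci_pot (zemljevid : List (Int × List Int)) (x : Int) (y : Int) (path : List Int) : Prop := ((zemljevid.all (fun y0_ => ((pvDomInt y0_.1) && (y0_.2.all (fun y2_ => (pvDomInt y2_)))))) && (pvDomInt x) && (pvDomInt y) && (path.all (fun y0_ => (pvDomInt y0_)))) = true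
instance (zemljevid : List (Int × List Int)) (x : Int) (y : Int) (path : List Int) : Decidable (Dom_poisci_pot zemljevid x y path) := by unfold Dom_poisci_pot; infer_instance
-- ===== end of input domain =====

-- ===== PORT A =====
-- B replaces A's recursive depth-first enumeration of all simple paths by an iterative
-- breadth-first frontier expansion that returns the first path reaching y at the lowest level.
-- A's recursion is ported with fuel `zemljevid.length + 2`, an upper bound on its depth
-- (every deeper recursive call starts at a distinct dict key).

-- `if newpath: if not shortest or len(newpath) < len(shortest): shortest = newpath`
-- (`not shortest` is Python truthiness: None or the empty list)
def pvUpd (shortest newpath : Option (List Int)) : Option (List Int) :=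
  match newpath with
  | none => shortest
  | some q =>
    if q.isEmpty then shortest
    else if (shortest.getD []).isEmpty then some q
    else if q.length < (shortest.getD []).length then some q else shortest

def poisci_potF (zemljevid : List (Int × List Int)) (y : Int) :
    Nat → Int → List Int → Option (List Int)
  | 0, _, _ => none
  | f+1, x, path =>
    let path' := path ++ [x]
    if x = y then some path'
    else if (PySem.Dict.mk zemljevid).get? x = none then none  -- `x not in zemljevid.keys()`
    else
      ((PySem.Dict.mk zemljevid).getD x []).foldl
        (fun shortest krizisce =>
          if krizisce ∈ path' then shortest
          else pvUpd shortest (poisci_potF zemljevid y f krizisce path'))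
        none

def poisci_pot (zemljevid : List (Int × List Int)) (x : Int) (y : Int) (path : List Int) : Option (List Int) :=
  poisci_potF zemljevid y (zemljevid.length + 2) x path

-- ===== PORT B =====
-- `p[-1]` — exact on the frontier, whose paths are all nonempty
def pvLast (p : List Int) : Int := (PySem.List.pyGet? p (-1)).getD 0

-- `for v in zemljevid.get(u, []): if v not in p: nxt.append(p + [v])`
def pvChildren (zemljevid : List (Int × List Int)) (p : List Int) : List (List Int) :=
  (((PySem.Dict.mk zemljevid).getD (pvLast p) []).filter (fun v => decide (v ∉ p))).map
    (fun v => p ++ [v])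

-- the inner `for p in frontier` loop: early `return p`, otherwise accumulate `nxt`
def bfsScan (zemljevid : List (Int × List Int)) (y : Int) :
    List (List Int) → List (List Int) → (List Int) ⊕ (List (List Int))
  | nxt, [] => Sum.inr nxt
  | nxt, p :: rest =>
    if pvLast p = y then Sum.inl p
    else bfsScan zemljevid y (nxt ++ pvChildren zemljevid p) rest

-- the outer `while frontier` loop; fuel `zemljevid.length + 2` bounds the number of
-- levels (frontier paths are simple and every inner node of one is a distinct dict key)
def bfsLoop (zemljevid : List (Int × List Int)) (y : Int) :
    Nat → List (List Int) → Option (List Int)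
  | 0, _ => none
  | f+1, frontier =>
    if frontier.isEmpty then none
    else
      match bfsScan zemljevid y [] frontier with
      | Sum.inl p => some p
      | Sum.inr nxt => bfsLoop zemljevid y f nxt

def poisci_pot_alt (zemljevid : List (Int × List Int)) (x : Int) (y : Int) (path : List Int) : Option (List Int) :=
  bfsLoop zemljevid y (zemljevid.length + 2) [path ++ [x]]

-- ===== PRECONDITION & SPEC =====
def Spec_poisci_pot (zemljevid : List (Int × List Int)) (x : Int) (y : Int) (path : List Int) (out : Option (List Int)) : Prop := out = poisci_pot_alt zemljevid x y path
instance (zemljevid : List (Int × List Int)) (x : Int) (y : Int) (path : List Int) (out : Option (List Int)) : Decidable (Spec_poisci_pot zemljevid x y path out) := by unfold Spec_poisci_pot; infer_instance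

-- ===== CLAIM (what is proved, stated in full; the proofs are below) =====
def Claim_equal_poisci_pot : Prop := ∀ (zemljevid : List (Int × List Int)) (x : Int) (y : Int) (path : List Int), Dom_poisci_pot zemljevid x y path → Spec_poisci_pot zemljevid x y path (poisci_pot zemljevid x y path)

-- ===== LEMMAS AND PROOFS =====

-- the value A keeps: first candidate, replaced only by a strictly shorter one
def pvM (a : Option (List Int)) (q : List Int) : Option (List Int) :=
  match a with
  | none => some q
  | some s => if q.length < s.length then some q else a

def pvBest (L : List (List Int)) : Option (List Int) := L.foldl pvM none

def pvMerge (a b : Option (List Int)) : Option (List Int) :=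
  match b with
  | none => a
  | some q => pvM a q

-- all admissible completions of the partial path p, in A's (depth-first) order
def pvCand (zemljevid : List (Int × List Int)) (y : Int) : Nat → List Int → List (List Int)
  | 0, _ => []
  | f+1, p =>
    if pvLast p = y then [p]
    else (pvChildren zemljevid p).flatMap (pvCand zemljevid y f)

lemma pvLast_concat (l : List Int) (a : Int) : pvLast (l ++ [a]) = a := by
  simp [pvLast, PySem.List.pyGet?_neg_one_append_singleton]

lemma pvMerge_pvM (a : Option (List Int)) (q : List Int) (b : Option (List Int)) :
    pvMerge (pvM a q) b = pvMerge a (pvMerge (some q) b) := by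
  cases b with
  | none => rfl
  | some r =>
    cases a with
    | none =>
      show pvM (pvM none q) r = pvMerge none (pvM (some q) r)
      by_cases h : r.length < q.length <;> simp [pvM, pvMerge, h]
    | some s =>
      show pvM (pvM (some s) q) r = pvMerge (some s) (pvM (some q) r)
      by_cases h1 : q.length < s.length <;> by_cases h2 : r.length < q.length <;>
        by_cases h3 : r.length < s.length <;>
        simp [pvM, pvMerge, h1, h2, h3] <;> first | rfl | omega

lemma foldl_pvM (L : List (List Int)) : ∀ a, L.foldl pvM a = pvMerge a (pvBest L) := by
  induction L with
  | nil => intro a; rfl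
  | cons q L ih =>
    intro a
    have h1 : pvBest (q :: L) = pvMerge (some q) (pvBest L) := by
      show (q :: L).foldl pvM none = _
      rw [List.foldl_cons, ih]; rfl
    rw [h1, List.foldl_cons, ih, pvMerge_pvM]

lemma pvBest_append (L1 L2 : List (List Int)) :
    pvBest (L1 ++ L2) = pvMerge (pvBest L1) (pvBest L2) := by
  show (L1 ++ L2).foldl pvM none = _
  rw [List.foldl_append, foldl_pvM]; rfl

lemma foldl_pvM_mem (L : List (List Int)) :
    ∀ a q, L.foldl pvM a = some q → q ∈ L ∨ a = some q := by
  induction L with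
  | nil => intro a q h; right; exact h
  | cons r L ih =>
    intro a q h
    rw [List.foldl_cons] at h
    rcases ih _ _ h with h' | h'
    · exact Or.inl (List.mem_cons_of_mem _ h')
    · cases a with
      | none =>
        left; simp only [pvM] at h'
        rw [Option.some.injEq] at h'
        exact List.mem_cons.mpr (Or.inl h'.symm)
      | some s =>
        by_cases hlt : r.length < s.length
        · left; simp only [pvM, if_pos hlt] at h'
          rw [Option.some.injEq] at h'
          exact List.mem_cons.mpr (Or.inl h'.symm)
        · right; simpa [pvM, hlt] using h'

lemma pvBest_mem {L : List (List Int)} {q : List Int} (h : pvBest L = some q) : q ∈ L := by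
  rcases foldl_pvM_mem L none q h with h' | h'
  · exact h'
  · cases h'

lemma foldl_pvM_stable (L : List (List Int)) (p : List Int)
    (h : ∀ q ∈ L, p.length ≤ q.length) : L.foldl pvM (some p) = some p := by
  induction L with
  | nil => rfl
  | cons r L ih =>
    rw [List.foldl_cons]
    have hr : ¬ r.length < p.length := by have := h r (by simp); omega
    rw [show pvM (some p) r = some p by simp [pvM, hr]]
    exact ih (fun q hq => h q (List.mem_cons_of_mem _ hq))

lemma pvChildren_mem {zemljevid : List (Int × List Int)} {p c : List Int}
    (h : c ∈ pvChildren zemljevid p) : ∃ v, c = p ++ [v] := by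
  simp only [pvChildren, List.mem_map] at h
  rcases h with ⟨v, _, rfl⟩
  exact ⟨v, rfl⟩

lemma pvCand_len (zemljevid : List (Int × List Int)) (y : Int) :
    ∀ f p q, q ∈ pvCand zemljevid y f p → p.length ≤ q.length := by
  intro f
  induction f with
  | zero => intro p q h; cases h
  | succ f ih =>
    intro p q h
    unfold pvCand at h
    split_ifs at h with hy
    · simp only [List.mem_singleton] at h; subst h; omega
    · rw [List.mem_flatMap] at h
      rcases h with ⟨c, hc, hq⟩
      rcases pvChildren_mem hc with ⟨v, rfl⟩
      have h2 := ih (p ++ [v]) q hq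
      simp only [List.length_append, List.length_cons, List.length_nil] at h2
      omega

lemma pvCand_len_strict (zemljevid : List (Int × List Int)) (y : Int)
    (f : Nat) (p q : List Int) (hy : pvLast p ≠ y) (h : q ∈ pvCand zemljevid y f p) :
    p.length < q.length := by
  cases f with
  | zero => cases h
  | succ f =>
    unfold pvCand at h
    rw [if_neg hy, List.mem_flatMap] at h
    rcases h with ⟨c, hc, hq⟩
    rcases pvChildren_mem hc with ⟨v, rfl⟩
    have h2 := pvCand_len zemljevid y f (p ++ [v]) q hq
    simp only [List.length_append, List.length_cons, List.length_nil] at h2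
    omega

lemma pvCand_ne_nil (zemljevid : List (Int × List Int)) (y : Int)
    (f : Nat) (p q : List Int) (hp : p ≠ []) (h : q ∈ pvCand zemljevid y f p) : q ≠ [] := by
  have h1 := pvCand_len zemljevid y f p q h
  have h2 : 0 < p.length := List.length_pos_iff.mpr hp
  exact List.ne_nil_of_length_pos (by omega)

def pvOkA (a : Option (List Int)) : Prop := ∀ s, a = some s → s ≠ []

lemma pvUpd_eq_pvMerge (a b : Option (List Int)) (ha : pvOkA a) (hb : pvOkA b) :
    pvUpd a b = pvMerge a b := by
  cases b with
  | none => rfl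
  | some q =>
    have hq : q ≠ [] := hb q rfl
    cases a with
    | none => simp [pvUpd, pvMerge, pvM, hq]
    | some s =>
      have hs : s ≠ [] := ha s rfl
      simp [pvUpd, pvMerge, pvM, hq, hs]

lemma pvOkA_merge (a : Option (List Int)) (L : List (List Int)) (ha : pvOkA a)
    (hL : ∀ q ∈ L, q ≠ []) : pvOkA (pvMerge a (pvBest L)) := by
  cases hb : pvBest L with
  | none => simpa [pvMerge] using ha
  | some m =>
    have hm : m ≠ [] := hL m (pvBest_mem hb)
    intro s hs
    cases a with
    | none => simp [pvMerge, pvM] at hs; subst hs; exact hm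
    | some t =>
      have ht : t ≠ [] := ha t rfl
      simp only [pvMerge, pvM] at hs
      split_ifs at hs <;> simp_all

lemma pvOkA_best_cand (zemljevid : List (Int × List Int)) (y : Int) (f : Nat) (p : List Int)
    (hp : p ≠ []) : pvOkA (pvBest (pvCand zemljevid y f p)) := by
  intro s hs
  exact pvCand_ne_nil zemljevid y f p s hp (pvBest_mem hs)

lemma foldA (zemljevid : List (Int × List Int)) (y : Int) (f : Nat)
    (IH : ∀ x path, poisci_potF zemljevid y f x path = pvBest (pvCand zemljevid y f (path ++ [x]))) :
    ∀ (adj : List Int) (p : List Int) (a : Option (List Int)), p ≠ [] → pvOkA a →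
      adj.foldl (fun shortest krizisce => if krizisce ∈ p then shortest
          else pvUpd shortest (poisci_potF zemljevid y f krizisce p)) a
      = List.foldl pvM a ((adj.filter (fun v => decide (v ∉ p))).flatMap
          (fun v => pvCand zemljevid y f (p ++ [v]))) := by
  intro adj
  induction adj with
  | nil => intro p a _ _; rfl
  | cons v adj ih =>
    intro p a hp ha
    by_cases hv : v ∈ p
    · rw [List.foldl_cons, if_pos hv, List.filter_cons_of_neg (by simp [hv])]
      exact ih p a hp ha
    · have hok : pvOkA (List.foldl pvM a (pvCand zemljevid y f (p ++ [v]))) := by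
        rw [foldl_pvM]
        exact pvOkA_merge _ _ ha (fun q hq => pvCand_ne_nil _ _ _ _ _ (by simp) hq)
      rw [List.foldl_cons, if_neg hv, List.filter_cons_of_pos (by simp [hv]),
        List.flatMap_cons, List.foldl_append, IH v p,
        pvUpd_eq_pvMerge _ _ ha (pvOkA_best_cand _ _ _ _ (by simp)), ← foldl_pvM]
      exact ih p _ hp hok

lemma poisci_potF_eq (zemljevid : List (Int × List Int)) (y : Int) :
    ∀ f x path, poisci_potF zemljevid y f x path = pvBest (pvCand zemljevid y f (path ++ [x])) := by
  intro f
  induction f with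
  | zero => intro x path; rfl
  | succ f ih =>
    intro x path
    rw [poisci_potF]
    by_cases hxy : x = y
    · rw [if_pos hxy]
      rw [pvCand, pvLast_concat, if_pos hxy]
      rfl
    · rw [if_neg hxy, pvCand, pvLast_concat, if_neg hxy]
      cases hkey : (PySem.Dict.mk zemljevid).get? x with
      | none =>
        rw [if_pos rfl]
        have hgd0 : (PySem.Dict.mk zemljevid).getD x [] = [] := by
          rw [PySem.Dict.getD_eq_get?_getD, hkey]; rfl
        have hch : pvChildren zemljevid (path ++ [x]) = [] := by
          rw [pvChildren, pvLast_concat, hgd0]; rfl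
        rw [hch]; rfl
      | some adj =>
        rw [if_neg (by simp)]
        have hgd : (PySem.Dict.mk zemljevid).getD x [] = adj := by
          rw [PySem.Dict.getD_eq_get?_getD, hkey]; rfl
        rw [hgd]
        rw [foldA zemljevid y f ih adj (path ++ [x]) none (by simp) (by intro s hs; cases hs)]
        have hch : pvChildren zemljevid (path ++ [x])
            = ((adj.filter (fun v => decide (v ∉ path ++ [x]))).map (fun v => path ++ [x] ++ [v])) := by
          simp [pvChildren, pvLast_concat, hgd]
        rw [hch, List.flatMap_map]
        rfl

lemma bfsScan_no_hit (zemljevid : List (Int × List Int)) (y : Int) :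
    ∀ F nxt, (∀ q ∈ F, pvLast q ≠ y) →
      bfsScan zemljevid y nxt F = Sum.inr (nxt ++ F.flatMap (pvChildren zemljevid)) := by
  intro F
  induction F with
  | nil => intro nxt _; simp [bfsScan]
  | cons p F ih =>
    intro nxt h
    rw [bfsScan, if_neg (h p (by simp)), ih _ (fun q hq => h q (List.mem_cons_of_mem _ hq))]
    simp

lemma bfsScan_hit (zemljevid : List (Int × List Int)) (y : Int) (p : List Int)
    (hp : pvLast p = y) :
    ∀ F1 F2 nxt, (∀ q ∈ F1, pvLast q ≠ y) →
      bfsScan zemljevid y nxt (F1 ++ p :: F2) = Sum.inl p := by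
  intro F1
  induction F1 with
  | nil => intro F2 nxt _; simp [bfsScan, hp]
  | cons r F1 ih =>
    intro F2 nxt h
    rw [List.cons_append, bfsScan, if_neg (h r (by simp))]
    exact ih _ _ (fun q hq => h q (List.mem_cons_of_mem _ hq))

lemma first_hit (y : Int) (F : List (List Int)) :
    (∀ q ∈ F, pvLast q ≠ y) ∨
      ∃ F1 p F2, F = F1 ++ p :: F2 ∧ (∀ q ∈ F1, pvLast q ≠ y) ∧ pvLast p = y := by
  induction F with
  | nil => left; simp
  | cons r F ih =>
    by_cases hr : pvLast r = y
    · right; exact ⟨[], r, F, by simp, by simp, hr⟩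
    · rcases ih with h | ⟨F1, p, F2, hF, h1, h2⟩
      · left
        intro q hq
        rcases List.mem_cons.mp hq with h' | h'
        · subst h'; exact hr
        · exact h q h'
      · right
        refine ⟨r :: F1, p, F2, by simp [hF], ?_, h2⟩
        intro q hq
        rcases List.mem_cons.mp hq with h' | h'
        · subst h'; exact hr
        · exact h1 q h'

lemma flatMap_congr_mem {α β : Type} (l : List α) {f g : α → List β}
    (h : ∀ a ∈ l, f a = g a) : l.flatMap f = l.flatMap g := by
  induction l with
  | nil => rfl
  | cons a l ih =>
    rw [List.flatMap_cons, List.flatMap_cons, h a (by simp),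
      ih (fun b hb => h b (List.mem_cons_of_mem _ hb))]

lemma bfsLoop_eq (zemljevid : List (Int × List Int)) (y : Int) :
    ∀ f F ℓ, (∀ p ∈ F, p ≠ [] ∧ p.length = ℓ) →
      bfsLoop zemljevid y f F = pvBest (F.flatMap (pvCand zemljevid y f)) := by
  intro f
  induction f with
  | zero =>
    intro F ℓ _
    have h0 : F.flatMap (pvCand zemljevid y 0) = [] := by
      simp [pvCand]
    rw [h0]; rfl
  | succ f ih =>
    intro F ℓ h
    rw [bfsLoop]
    by_cases hF : F = []
    · subst hF; rfl
    · rw [if_neg (by simpa [List.isEmpty_iff] using hF)]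
      rcases first_hit y F with hno | ⟨F1, p, F2, rfl, h1, h2⟩
      · rw [bfsScan_no_hit zemljevid y F [] hno]
        show bfsLoop zemljevid y f ([] ++ F.flatMap (pvChildren zemljevid)) = _
        rw [List.nil_append]
        have hch : ∀ c ∈ F.flatMap (pvChildren zemljevid), c ≠ [] ∧ c.length = ℓ + 1 := by
          intro c hc
          rw [List.mem_flatMap] at hc
          rcases hc with ⟨q, hq, hcq⟩
          rcases pvChildren_mem hcq with ⟨v, rfl⟩
          have := (h q hq).2
          constructor
          · simp
          · simp [this]
        rw [ih _ (ℓ + 1) hch, List.flatMap_assoc]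
        refine congrArg pvBest (flatMap_congr_mem F ?_)
        intro q hq
        rw [pvCand, if_neg (hno q hq)]
      · have hcand : pvCand zemljevid y (f + 1) p = [p] := by
          rw [pvCand, if_pos h2]
        rw [bfsScan_hit zemljevid y p h2 F1 F2 [] h1]
        show some p = _
        have hp : p.length = ℓ := (h p (by simp)).2
        rw [List.flatMap_append, List.flatMap_cons, hcand, pvBest_append]
        have hmid : pvBest (p :: F2.flatMap (pvCand zemljevid y (f + 1))) = some p := by
          show (p :: _).foldl pvM none = _
          rw [List.foldl_cons]
          refine foldl_pvM_stable _ _ ?_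
          intro q hq
          rw [List.mem_flatMap] at hq
          rcases hq with ⟨r, hr, hqr⟩
          have hrl : r.length = ℓ := (h r (by simp [hr])).2
          have := pvCand_len zemljevid y (f + 1) r q hqr
          omega
        rw [show ([p] ++ F2.flatMap (pvCand zemljevid y (f+1)))
            = p :: F2.flatMap (pvCand zemljevid y (f+1)) from rfl, hmid]
        cases hb : pvBest (F1.flatMap (pvCand zemljevid y (f + 1))) with
        | none => rfl
        | some s =>
          have hs := pvBest_mem hb
          rw [List.mem_flatMap] at hs
          rcases hs with ⟨r, hr, hsr⟩
          have hrl : r.length = ℓ := (h r (by simp [hr])).2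
          have hst := pvCand_len_strict zemljevid y (f + 1) r s (h1 r hr) hsr
          have hfin : pvMerge (some s) (some p) = some p := by
            simp only [pvMerge, pvM]
            rw [if_pos (by omega)]
          rw [hfin]

-- ===== VERDICT (by name: the statement is the Claim_ definition above) =====
theorem poisci_pot_spec : Claim_equal_poisci_pot := by
  intro zemljevid x y path _
  show poisci_pot zemljevid x y path = poisci_pot_alt zemljevid x y path
  rw [poisci_pot, poisci_pot_alt, poisci_potF_eq,
    bfsLoop_eq zemljevid y _ _ (path ++ [x]).length (by simp)]
  simp
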